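-- pv_equiv track=rewrite | github.com/ztlxltl/FamilyTreeView | src/abbreviated_name_display.py | _fake_small_caps
-- ===== SOURCE A (Python) =====
-- import unicodedata
--
-- def _fake_small_caps(names, petite_caps=False, **kwargs):
--     # Pango's <span variant="small-caps"> doesn't scale well when zooming the canvas and a Pango warning appears:
--     # "failed to create cairo scaled font, expect ugly output. the offending font is ..."
--     # This function creates fake small caps instead.
--     small_caps_names = []
--     for name in names:
--         if len(name) == 0:
--             small_caps_names.append("")
--             continue
--
--         # get char groups, equivalent to char_groups = re.findall(r'[^a-z]+|[a-z]+', name) but with all unicode Ll characters.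
--         char_groups = []
--         group = ""
--         for char in name:
--             char_is_lowercase = unicodedata.category(char) == "Ll"
--             if len(group) == 0:
--                 if char_is_lowercase:
--                     # second group is first lowercase group
--                     char_groups.append("")
--                 # new group
--                 group += char
--                 group_is_lowercase = char_is_lowercase
--             elif char_is_lowercase == group_is_lowercase:
--                 group += char
--             else:
--                 # end of group
--                 if len(group) > 0:
--                     char_groups.append(group)
--                 # new group
--                 group = char
--                 group_is_lowercase = char_is_lowercase
--         if len(group) > 0:
--             # last group
--             char_groups.append(group)
--
--         for i in range(1, len(char_groups), 2): # every second group is lowercase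
--             if char_groups[i] == "":
--                 continue
--             # Use these to see how it looks. It has wrong size when zoomed.
--             # char_groups[i] = '<span variant="small-caps">' + char_groups[i] + "</span>"
--             # char_groups[i] = '<span variant="petite-caps">' + char_groups[i] + "</span>"
--             if petite_caps:
--                 char_groups[i] = "<small><small>" + char_groups[i].upper() + "</small></small>" # similar to petite caps
--             else:
--                 char_groups[i] = "<small>" + char_groups[i].upper() + "</small>" # similar to small caps
--         small_caps_names.append(''.join(char_groups))
--     return small_caps_names
-- ===== SOURCE B (Python) =====
-- import unicodedata
--
--
-- def _fake_small_caps(names, petite_caps=False, **kwargs):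
--     # Wrap every lowercase (Unicode Ll) character in its own markup block, then
--     # merge adjacent blocks by deleting every "close-tag + open-tag" seam with a
--     # single str.replace pass. The seam string contains lowercase letters, which
--     # never survive the per-character wrapping, so replace only hits real seams.
--     opn, cls = ("<small><small>", "</small></small>") if petite_caps else ("<small>", "</small>")
--     seam = cls + opn
--     out = []
--     for name in names:
--         tagged = ''.join(
--             opn + ch.upper() + cls if unicodedata.category(ch) == "Ll" else ch
--             for ch in name)
--         out.append(tagged.replace(seam, ''))
--     return out
-- ===== Notes on version B (the rewrite author's own statement) =====
-- stated objective: alternative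
-- what changed: Instead of splitting each name into maximal lowercase/other runs and wrapping odd-indexed groups, B wraps every lowercase character in its own markup block and then merges adjacent blocks by deleting every close-tag+open-tag seam with a single str.replace pass (the seam contains lowercase letters, which never survive the per-character wrapping, so replace only hits real seams).
import Mathlib
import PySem

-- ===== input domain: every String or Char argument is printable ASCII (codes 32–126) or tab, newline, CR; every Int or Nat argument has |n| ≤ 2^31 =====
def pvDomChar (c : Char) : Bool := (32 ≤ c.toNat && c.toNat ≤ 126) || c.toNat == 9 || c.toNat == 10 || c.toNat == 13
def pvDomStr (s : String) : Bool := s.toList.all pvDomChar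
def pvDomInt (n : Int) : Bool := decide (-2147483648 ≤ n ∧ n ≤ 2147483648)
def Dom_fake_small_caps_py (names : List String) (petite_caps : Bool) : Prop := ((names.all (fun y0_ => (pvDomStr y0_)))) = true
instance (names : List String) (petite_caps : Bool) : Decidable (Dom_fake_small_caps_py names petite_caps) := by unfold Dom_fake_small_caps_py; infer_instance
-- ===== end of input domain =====

-- B wraps every lowercase character in its own markup block and deletes every
-- close+open tag seam with one replace pass, instead of A's run grouping with
-- odd-index wrapping; objective: alternative (different algorithm, same cost).


-- ===== PORT A =====
-- unicodedata.category(c) == "Ll": exact on the printable-ASCII domain, where the Ll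
-- characters are exactly 'a'..'z'.
def pvIsLl (c : Char) : Bool := decide ('a' ≤ c) && decide (c ≤ 'z')

-- A's markup: "<small>…</small>" / "<small><small>…</small></small>" around group.upper()
def pvWrap (petite_caps : Bool) (g : List Char) : List Char :=
  if petite_caps then "<small><small>".toList ++ PySem.Chars.upper g ++ "</small></small>".toList
  else "<small>".toList ++ PySem.Chars.upper g ++ "</small>".toList

-- one step of A's character loop; state = (char_groups, group, group_is_lowercase)
def pvStepA (st : List (List Char) × List Char × Bool) (c : Char) : List (List Char) × List Char × Bool :=
  let cl := pvIsLl c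
  if st.2.1.isEmpty then
    ((if cl then st.1 ++ [[]] else st.1), st.2.1 ++ [c], cl)
  else if cl == st.2.2 then
    (st.1, st.2.1 ++ [c], st.2.2)
  else
    (st.1 ++ [st.2.1], [c], cl)

-- A's char_groups for one name (loop over chars, then append the last group if nonempty)
def pvGroupsA (name : List Char) : List (List Char) :=
  let st := name.foldl pvStepA ([], [], false)
  if st.2.1.isEmpty then st.1 else st.1 ++ [st.2.1]

-- `for i in range(1, len, 2): …` wraps exactly the nonempty groups at odd indices
def pvModA (petite_caps : Bool) (groups : List (List Char)) : List (List Char) :=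
  groups.zipIdx.map (fun gi =>
    if gi.2 % 2 == 1 then (if gi.1.isEmpty then gi.1 else pvWrap petite_caps gi.1) else gi.1)

def fake_small_caps_py (names : List String) (petite_caps : Bool) : List String :=
  names.foldl (fun acc name =>
    if name.toList.isEmpty then acc ++ [""]
    else acc ++ [String.mk ((pvModA petite_caps (pvGroupsA name.toList)).flatten)]) []

-- ===== PORT B =====
-- opn, cls = ("<small><small>", "</small></small>") if petite_caps else ("<small>", "</small>")
def pvOpn (petite_caps : Bool) : List Char :=
  if petite_caps then "<small><small>".toList else "<small>".toList
def pvCls (petite_caps : Bool) : List Char :=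
  if petite_caps then "</small></small>".toList else "</small>".toList

-- one character's piece: opn + ch.upper() + cls if lowercase else ch
-- (ch.upper() of a single ASCII char is Chars.upperChar; exact on the ASCII domain)
def pvBlock (petite_caps : Bool) (ch : Char) : List Char :=
  if pvIsLl ch then pvOpn petite_caps ++ [PySem.Chars.upperChar ch] ++ pvCls petite_caps
  else [ch]

def fake_small_caps_py_alt (names : List String) (petite_caps : Bool) : List String :=
  names.map (fun name =>
    String.mk (PySem.Chars.replace ((name.toList.map (pvBlock petite_caps)).flatten)
      (pvCls petite_caps ++ pvOpn petite_caps) []))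

-- ===== PRECONDITION & SPEC =====
def Spec_fake_small_caps_py (names : List String) (petite_caps : Bool) (out : List String) : Prop := out = fake_small_caps_py_alt names petite_caps
instance (names : List String) (petite_caps : Bool) (out : List String) : Decidable (Spec_fake_small_caps_py names petite_caps out) := by unfold Spec_fake_small_caps_py; infer_instance

-- ===== CLAIM (what is proved, stated in full; the proofs are below) =====
def Claim_equal_fake_small_caps_py : Prop := ∀ (names : List String) (petite_caps : Bool), Dom_fake_small_caps_py names petite_caps → Spec_fake_small_caps_py names petite_caps (fake_small_caps_py names petite_caps)

-- ===== LEMMAS AND PROOFS =====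

-- ---------- runs of equal-lowercaseness characters (proof-side normal form) ----------
def pvRuns (cs : List Char) : List (Bool × List Char) :=
  match cs with
  | [] => []
  | c :: rest =>
    match pvRuns rest with
    | [] => [(pvIsLl c, [c])]
    | (b, g) :: rs =>
      if pvIsLl c == b then (b, c :: g) :: rs else (pvIsLl c, [c]) :: (b, g) :: rs

def pvRenderB (petite_caps : Bool) (r : Bool × List Char) : List Char :=
  if r.1 then pvWrap petite_caps r.2 else r.2

-- adjacent runs carry different keys
def pvAlt : List (Bool × List Char) → Prop
  | [] => True
  | [_] => True
  | a :: b :: rs => a.1 ≠ b.1 ∧ pvAlt (b :: rs)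

theorem pvRuns_cons (c : Char) (l : List Char) :
    pvRuns (c :: l) = match pvRuns l with
      | [] => [(pvIsLl c, [c])]
      | (b, g) :: rs => if pvIsLl c == b then (b, c :: g) :: rs
                        else (pvIsLl c, [c]) :: (b, g) :: rs := rfl

theorem pvRuns_nonempty : ∀ (cs : List Char), ∀ r ∈ pvRuns cs, r.2 ≠ [] := by
  intro cs
  induction cs with
  | nil => simp [pvRuns]
  | cons c rest ih =>
    intro r hr
    simp only [pvRuns] at hr
    cases h : pvRuns rest with
    | nil => rw [h] at hr; simp at hr; subst hr; simp
    | cons p rs =>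
      obtain ⟨b, g⟩ := p
      rw [h] at hr ih
      by_cases hc : pvIsLl c == b
      · simp [hc] at hr
        rcases hr with hr | hr
        · subst hr; simp
        · exact ih r (by simp [hr])
      · simp [hc] at hr
        rcases hr with hr | hr | hr
        · subst hr; simp
        · subst hr; exact ih (b, g) (by simp)
        · exact ih r (by simp [hr])

theorem pvRuns_head_key (c : Char) (cs : List Char) :
    ∀ r, (pvRuns (c :: cs)).head? = some r → r.1 = pvIsLl c := by
  intro r hr
  rw [pvRuns_cons] at hr
  cases h : pvRuns cs with
  | nil => rw [h] at hr; simp at hr; subst hr; rfl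
  | cons p rs =>
    obtain ⟨b, g⟩ := p
    rw [h] at hr
    by_cases hc : (pvIsLl c == b) = true
    · simp [hc] at hr; subst hr; exact (eq_of_beq hc).symm
    · simp [hc] at hr; subst hr; rfl

theorem pvRuns_alt : ∀ (cs : List Char), pvAlt (pvRuns cs) := by
  intro cs
  induction cs with
  | nil => simp [pvRuns, pvAlt]
  | cons c rest ih =>
    simp only [pvRuns]
    cases h : pvRuns rest with
    | nil => simp [pvAlt]
    | cons p rs =>
      obtain ⟨b, g⟩ := p
      rw [h] at ih
      by_cases hc : pvIsLl c == b
      · simp only [hc, if_pos]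
        cases rs with
        | nil => simp [pvAlt]
        | cons q rs' => exact ⟨ih.1, ih.2⟩
      · simp only [hc]
        exact ⟨by simpa using hc, ih⟩

-- every char of a run has the run's key
theorem pvRuns_keys : ∀ (cs : List Char), ∀ r ∈ pvRuns cs, ∀ c ∈ r.2, pvIsLl c = r.1 := by
  intro cs
  induction cs with
  | nil => simp [pvRuns]
  | cons c rest ih =>
    intro r hr
    simp only [pvRuns] at hr
    cases h : pvRuns rest with
    | nil =>
      rw [h] at hr; simp at hr; subst hr
      intro d hd; simp at hd; subst hd; rfl
    | cons p rs =>
      obtain ⟨b, g⟩ := p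
      rw [h] at hr ih
      by_cases hc : (pvIsLl c == b) = true
      · simp [hc] at hr
        rcases hr with hr | hr
        · subst hr; intro d hd
          simp at hd
          rcases hd with hd | hd
          · subst hd; exact eq_of_beq hc
          · exact ih (b, g) (by simp) d hd
        · exact ih r (by simp [hr])
      · simp [hc] at hr
        rcases hr with hr | hr | hr
        · subst hr; intro d hd; simp at hd; subst hd; rfl
        · subst hr; exact ih (b, g) (by simp)
        · exact ih r (by simp [hr])

-- the runs partition the characters
theorem pvRuns_flatten : ∀ (cs : List Char), ((pvRuns cs).map Prod.snd).flatten = cs := by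
  intro cs
  induction cs with
  | nil => simp [pvRuns]
  | cons c rest ih =>
    simp only [pvRuns]
    cases h : pvRuns rest with
    | nil => rw [h] at ih; simp at ih; simp [ih]
    | cons p rs =>
      obtain ⟨b, g⟩ := p
      rw [h] at ih
      by_cases hc : (pvIsLl c == b) = true
      · simp [hc]; simpa using ih
      · simp [hc]; simpa using ih

theorem pvRuns_prepend (k : Bool) : ∀ (g ys : List Char), g ≠ [] →
    (∀ c ∈ g, pvIsLl c = k) →
    (∀ r, (pvRuns ys).head? = some r → r.1 ≠ k) →
    pvRuns (g ++ ys) = (k, g) :: pvRuns ys := by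
  intro g
  induction g with
  | nil => simp
  | cons c g' ih =>
    intro ys _ hk hhead
    have hck : pvIsLl c = k := hk c (by simp)
    cases g' with
    | nil =>
      simp only [List.cons_append, List.nil_append, pvRuns_cons]
      cases h : pvRuns ys with
      | nil => simp [hck]
      | cons p rs =>
        have hbk : p.1 ≠ k := hhead p (by rw [h]; rfl)
        obtain ⟨b, gg⟩ := p
        have hkb : ¬ k = b := fun hh => hbk (by simp [hh])
        simp [hck, hkb]
    | cons d g'' =>
      have hrec := ih ys (by simp) (fun x hx => hk x (by simp [hx])) hhead
      simp only [List.cons_append] at hrec ⊢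
      rw [pvRuns_cons, hrec]
      simp [hck]

-- ---------- A's loop computes the runs ----------
theorem pvFoldA_inv : ∀ (xs : List Char) (groups : List (List Char)) (group : List Char) (k : Bool),
    group ≠ [] → (∀ c ∈ group, pvIsLl c = k) →
    (let st := xs.foldl pvStepA (groups, group, k);
     if st.2.1.isEmpty then st.1 else st.1 ++ [st.2.1]) =
      groups ++ (pvRuns (group ++ xs)).map Prod.snd := by
  intro xs
  induction xs with
  | nil =>
    intro groups group k hne hk
    have h := pvRuns_prepend k group [] hne hk (by simp [pvRuns])
    rw [List.append_nil] at h
    simp only [List.foldl_nil, List.append_nil, h]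
    simp [hne, pvRuns]
  | cons c xs ih =>
    intro groups group k hne hk
    simp only [List.foldl_cons]
    have hgE : group.isEmpty = false := by simp [hne]
    by_cases hc : (pvIsLl c == k) = true
    · have hstep : pvStepA (groups, group, k) c = (groups, group ++ [c], k) := by
        simp [pvStepA, hgE, hc]
      rw [hstep]
      have := ih groups (group ++ [c]) k (by simp)
        (by intro x hx; rcases List.mem_append.1 hx with hx | hx
            · exact hk x hx
            · simp at hx; subst hx; exact eq_of_beq hc)
      rw [this]
      simp
    · have hstep : pvStepA (groups, group, k) c = (groups ++ [group], [c], pvIsLl c) := by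
        simp only [pvStepA, hgE]
        simp [hc]
      rw [hstep]
      have hmain := ih (groups ++ [group]) [c] (pvIsLl c) (by simp) (by simp)
      rw [hmain]
      have hpre : pvRuns (group ++ (c :: xs)) = (k, group) :: pvRuns (c :: xs) := by
        apply pvRuns_prepend k group (c :: xs) hne hk
        intro r hr
        rw [pvRuns_head_key c xs r hr]
        intro hh
        exact hc (by rw [hh]; exact beq_self_eq_true k)
      rw [hpre]
      simp

-- the odd-index wrap, written as a parity recursion
def pvMapOdd (petite_caps : Bool) : Bool → List (List Char) → List (List Char)
  | _, [] => []
  | odd, g :: gs =>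
    (if odd then (if g.isEmpty then g else pvWrap petite_caps g) else g) ::
      pvMapOdd petite_caps (!odd) gs

theorem pvModA_aux (pc : Bool) : ∀ (gs : List (List Char)) (n : Nat),
    (gs.zipIdx n).map (fun gi =>
      if gi.2 % 2 == 1 then (if gi.1.isEmpty then gi.1 else pvWrap pc gi.1) else gi.1) =
      pvMapOdd pc (n % 2 == 1) gs := by
  intro gs
  induction gs with
  | nil => intro n; simp [pvMapOdd]
  | cons g gs ih =>
    intro n
    rw [List.zipIdx_cons, List.map_cons, ih (n + 1), pvMapOdd]
    have hpar : ((n + 1) % 2 == 1) = !(n % 2 == 1) := by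
      rcases Nat.mod_two_eq_zero_or_one n with h | h <;>
        simp [Nat.add_mod, h]
    rw [hpar]

theorem pvModA_eq_mapOdd (pc : Bool) (gs : List (List Char)) :
    pvModA pc gs = pvMapOdd pc false gs := by
  have := pvModA_aux pc gs 0
  simpa [pvModA] using this

-- on alternating nonempty runs whose head key equals the parity, wrapping by index parity
-- equals wrapping by key
theorem pvMapOdd_eq_render (pc : Bool) : ∀ (rs : List (Bool × List Char)) (b : Bool),
    (∀ r ∈ rs, r.2 ≠ []) → pvAlt rs →
    (∀ r, rs.head? = some r → r.1 = b) →
    pvMapOdd pc b (rs.map Prod.snd) = rs.map (pvRenderB pc) := by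
  intro rs
  induction rs with
  | nil => intro b _ _ _; simp [pvMapOdd]
  | cons r rs ih =>
    intro b hne halt hhead
    obtain ⟨k, g⟩ := r
    have hkb : k = b := hhead (k, g) rfl
    have hgne : g ≠ [] := hne (k, g) (by simp)
    have hgE : g.isEmpty = false := by simp [hgne]
    rw [List.map_cons, pvMapOdd]
    have htail : pvMapOdd pc (!b) (rs.map Prod.snd) = rs.map (pvRenderB pc) := by
      apply ih (!b) (fun x hx => hne x (by simp [hx]))
      · cases rs with
        | nil => trivial
        | cons q rs' => exact halt.2
      · intro q hq
        cases rs with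
        | nil => simp at hq
        | cons q' rs' =>
          simp only [List.head?_cons, Option.some.injEq] at hq
          have h1 : k ≠ q.1 := hq ▸ (halt.1 : (k, g).1 ≠ q'.1)
          rw [hkb] at h1
          cases b <;> cases hq2 : q.1 <;> simp_all
    rw [htail]
    subst hkb
    cases k <;> simp [pvRenderB, hgE]

-- per-name value of A's pipeline, in terms of the runs
theorem pvName_eq (pc : Bool) (name : List Char) :
    (if name.isEmpty then ""
     else String.mk ((pvModA pc (pvGroupsA name)).flatten)) =
      String.mk (((pvRuns name).map (pvRenderB pc)).flatten) := by
  cases name with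
  | nil => simp [pvRuns]; rfl
  | cons c rest =>
    simp only [List.isEmpty_cons, Bool.false_eq_true, if_false]
    have hfold : pvGroupsA (c :: rest) =
        (if pvIsLl c then [[]] else []) ++ (pvRuns (c :: rest)).map Prod.snd := by
      have hstep : pvStepA ([], [], false) c =
          ((if pvIsLl c then [[]] else []), [c], pvIsLl c) := by
        simp [pvStepA]
      have hinv := pvFoldA_inv rest (if pvIsLl c then [[]] else []) [c] (pvIsLl c)
        (by simp) (by simp)
      simpa [pvGroupsA, List.foldl_cons, hstep] using hinv
    rw [hfold, pvModA_eq_mapOdd]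
    have hrender := pvMapOdd_eq_render pc (pvRuns (c :: rest)) (pvIsLl c)
      (pvRuns_nonempty _) (pvRuns_alt _) (pvRuns_head_key c rest)
    by_cases hc : pvIsLl c = true
    · rw [hc] at hrender
      simp only [hc, if_pos, List.cons_append, List.nil_append]
      rw [show ([] : List Char) :: (pvRuns (c :: rest)).map Prod.snd =
            [] :: (pvRuns (c :: rest)).map Prod.snd from rfl, pvMapOdd]
      simp [hrender]
    · have hc' : pvIsLl c = false := by simpa using hc
      rw [hc'] at hrender
      simp only [hc', Bool.false_eq_true, if_false, List.nil_append]
      rw [hrender]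

theorem pvFold_names (pc : Bool) : ∀ (names : List String) (acc : List String),
    names.foldl (fun acc name =>
      if name.toList.isEmpty then acc ++ [""]
      else acc ++ [String.mk ((pvModA pc (pvGroupsA name.toList)).flatten)]) acc =
    acc ++ names.map (fun name =>
      String.mk (((pvRuns name.toList).map (pvRenderB pc)).flatten)) := by
  intro names
  induction names with
  | nil => intro acc; simp
  | cons n ns ih =>
    intro acc
    rw [List.foldl_cons, List.map_cons]
    have hn := pvName_eq pc n.toList
    by_cases h : n.toList.isEmpty = true
    · rw [if_pos h] at hn ⊢
      rw [ih, hn]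
      simp
    · rw [if_neg h] at hn ⊢
      rw [ih, hn]
      simp

-- ---------- basic facts about PySem.Chars.replace (nonempty pattern) ----------
theorem pvGo_spec (old new : List Char) (hold : old ≠ []) :
    ∀ (fuel : Nat) (l acc : List Char), l.length ≤ fuel →
      PySem.Chars.replace.go old new fuel l acc =
        acc.reverse ++ PySem.Chars.replace l old new := by
  intro fuel
  induction fuel using Nat.strong_induction_on with
  | _ fuel ih =>
    intro l acc hlen
    have holdE : old.isEmpty = false := by simp [hold]
    cases l with
    | nil =>
      cases fuel with
      | zero => simp [PySem.Chars.replace.go, PySem.Chars.replace, holdE]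
      | succ f => simp [PySem.Chars.replace.go, PySem.Chars.replace, holdE]
    | cons c t =>
      cases fuel with
      | zero => simp at hlen
      | succ f =>
        have htf : t.length ≤ f := by simpa using hlen
        have hrepl : PySem.Chars.replace (c :: t) old new =
            PySem.Chars.replace.go old new (t.length + 1) (c :: t) [] := by
          simp [PySem.Chars.replace, holdE]
        by_cases hp : old.isPrefixOf (c :: t) = true
        · rw [show PySem.Chars.replace.go old new (f + 1) (c :: t) acc =
              PySem.Chars.replace.go old new f ((c :: t).drop old.length) (new.reverse ++ acc)
            from by simp [PySem.Chars.replace.go, hp]]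
          have hol : 1 ≤ old.length := by cases old with | nil => simp at hold | cons _ _ => simp
          have hdl : ((c :: t).drop old.length).length ≤ t.length := by
            simp only [List.length_drop, List.length_cons]; omega
          rw [ih f (by omega) _ _ (le_trans hdl htf)]
          rw [hrepl,
            show PySem.Chars.replace.go old new (t.length + 1) (c :: t) [] =
              PySem.Chars.replace.go old new t.length ((c :: t).drop old.length) (new.reverse ++ [])
            from by simp [PySem.Chars.replace.go, hp],
            ih t.length (by omega) _ _ hdl]
          simp
        · rw [show PySem.Chars.replace.go old new (f + 1) (c :: t) acc =
              PySem.Chars.replace.go old new f t (c :: acc)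
            from by simp [PySem.Chars.replace.go, hp]]
          rw [ih f (by omega) _ _ htf]
          rw [hrepl,
            show PySem.Chars.replace.go old new (t.length + 1) (c :: t) [] =
              PySem.Chars.replace.go old new t.length t (c :: [])
            from by simp [PySem.Chars.replace.go, hp],
            ih t.length (by omega) _ _ le_rfl]
          simp

theorem pvRepl_nil (old new : List Char) (hold : old ≠ []) :
    PySem.Chars.replace [] old new = [] := by
  have holdE : old.isEmpty = false := by simp [hold]
  simp [PySem.Chars.replace, holdE, PySem.Chars.replace.go]

theorem pvRepl_skip (old new : List Char) (hold : old ≠ []) (c : Char) (t : List Char)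
    (h : old.isPrefixOf (c :: t) = false) :
    PySem.Chars.replace (c :: t) old new = c :: PySem.Chars.replace t old new := by
  have holdE : old.isEmpty = false := by simp [hold]
  rw [show PySem.Chars.replace (c :: t) old new =
      PySem.Chars.replace.go old new (t.length + 1) (c :: t) [] from by
    simp [PySem.Chars.replace, holdE]]
  rw [show PySem.Chars.replace.go old new (t.length + 1) (c :: t) [] =
      PySem.Chars.replace.go old new t.length t (c :: []) from by
    simp [PySem.Chars.replace.go, h]]
  rw [pvGo_spec old new hold t.length t [c] le_rfl]
  simp

theorem pvRepl_seam (old new v : List Char) (hold : old ≠ []) :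
    PySem.Chars.replace (old ++ v) old new = new ++ PySem.Chars.replace v old new := by
  have holdE : old.isEmpty = false := by simp [hold]
  have hp : old.isPrefixOf (old ++ v) = true := by
    rw [List.isPrefixOf_iff_prefix]; exact List.prefix_append _ _
  cases h : old ++ v with
  | nil => simp at h; exact absurd h.1 hold
  | cons c t =>
    rw [show PySem.Chars.replace (c :: t) old new =
        PySem.Chars.replace.go old new (t.length + 1) (c :: t) [] from by
      simp [PySem.Chars.replace, holdE]]
    have hp' : old.isPrefixOf (c :: t) = true := h ▸ hp
    rw [show PySem.Chars.replace.go old new (t.length + 1) (c :: t) [] =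
        PySem.Chars.replace.go old new t.length ((c :: t).drop old.length) (new.reverse ++ []) from by
      simp [PySem.Chars.replace.go, hp']]
    have hd : (c :: t).drop old.length = v := by rw [← h, List.drop_left]
    rw [hd]
    have hvl : v.length ≤ t.length := by
      have := congrArg List.length h
      simp at this
      have hol : 1 ≤ old.length := by cases old with | nil => simp at hold | cons _ _ => simp
      omega
    rw [pvGo_spec old new hold t.length v _ hvl]
    simp

theorem pvNot_pref (J s t : List Char) (hsl : s.length ≤ J.length)
    (h : J.take s.length ≠ s) : ¬ J <+: (s ++ t) := by
  rintro ⟨r, hr⟩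
  apply h
  have := congrArg (List.take s.length) hr
  rw [List.take_left] at this
  rw [List.take_append_of_le_length hsl] at this
  exact this


def pvOkW (J x : List Char) : Bool :=
  (List.range x.length).all (fun i =>
    decide (J.take (min J.length (x.length - i)) ≠ (x.drop i).take (min J.length (x.length - i))))

def pvSeam (pc : Bool) : List Char := pvCls pc ++ pvOpn pc

theorem pvSeam_ne (pc : Bool) : pvSeam pc ≠ [] := by cases pc <;> decide

-- shape of the stream that follows a lowercase run: a nonempty all-non-lower chunk,
-- then nothing or a stream opening with "<s"
def pvHu (u : List Char) : Prop :=
  u = [] ∨ ∃ g w, u = g ++ w ∧ g ≠ [] ∧ (∀ c ∈ g, pvIsLl c = false) ∧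
    (w = [] ∨ ∃ t, w = '<' :: 's' :: t)

def pvBlocks (pc : Bool) (g : List Char) : List Char :=
  (g.map (fun c => pvOpn pc ++ [PySem.Chars.upperChar c] ++ pvCls pc)).flatten

def pvStream (pc : Bool) (rs : List (Bool × List Char)) : List Char :=
  (rs.map (fun r => (r.2.map (pvBlock pc)).flatten)).flatten

theorem pvSkip_internal (J new : List Char) (hJ : J ≠ []) :
    ∀ (x v : List Char), pvOkW J x = true →
      PySem.Chars.replace (x ++ v) J new = x ++ PySem.Chars.replace v J new := by
  intro x
  induction x with
  | nil => intro v _; simp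
  | cons c x' ih =>
    intro v hok
    simp only [pvOkW, List.all_eq_true, List.mem_range] at hok
    have h0 := hok 0 (by simp)
    simp only [List.drop_zero, Nat.sub_zero, decide_eq_true_eq] at h0
    have hnp : ¬ J <+: ((c :: x') ++ v) := by
      have hm : min J.length (c :: x').length ≤ (c :: x').length := Nat.min_le_right _ _
      have heq : ((c :: x').take (min J.length (c :: x').length)) ++
          (((c :: x').drop (min J.length (c :: x').length)) ++ v) = (c :: x') ++ v := by
        rw [← List.append_assoc, List.take_append_drop]
      rw [← heq]
      apply pvNot_pref
      · simp [List.length_take]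
      · rw [List.length_take, Nat.min_eq_left hm] at *
        intro hcontra
        exact h0 hcontra
    have hpf : J.isPrefixOf ((c :: x') ++ v) = false := by
      rw [← Bool.not_eq_true, List.isPrefixOf_iff_prefix]; exact hnp
    rw [List.cons_append, pvRepl_skip J new hJ _ _ (by simpa using hpf)]
    rw [ih v ?_]
    · simp
    · simp only [pvOkW, List.all_eq_true, List.mem_range]
      intro i hi
      have := hok (i + 1) (by simpa using Nat.succ_lt_succ hi)
      simpa using this

theorem pvNot_cfs (p : List Char) (h3 : p.take 3 = ['<', '/', 's']) :
    ∀ (g w : List Char), (∀ c ∈ g, pvIsLl c = false) →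
      (w = [] ∨ ∃ t, w = '<' :: 's' :: t) → ¬ p <+: (g ++ w) := by
  intro g w hg hw hpre
  have hlen : 3 ≤ p.length := by
    by_contra hl
    have hl' : p.length < 3 := by omega
    have : (p.take 3).length < 3 := by rw [List.length_take]; omega
    rw [h3] at this; simp at this
  -- the first three characters of g ++ w equal '<' '/' 's'
  have htake : (g ++ w).take 3 = ['<', '/', 's'] := by
    obtain ⟨r, hr⟩ := hpre
    have h1 := congrArg (List.take 3) hr
    rw [List.take_append_of_le_length hlen, h3] at h1
    exact h1.symm
  obtain _ | ⟨c, _ | ⟨d, _ | ⟨e, g'⟩⟩⟩ := g <;>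
    rcases hw with rfl | ⟨t, rfl⟩ <;> simp at htake
  · have hlow := hg e (by simp)
    rw [htake.2.2] at hlow
    exact absurd hlow (by decide)
  · have hlow := hg e (by simp)
    rw [htake.2.2] at hlow
    exact absurd hlow (by decide)

theorem pvNot_ls (p : List Char) (h2 : p.take 2 = ['<', 's']) :
    ∀ (g w : List Char), g ≠ [] → (∀ c ∈ g, pvIsLl c = false) →
      (w = [] ∨ ∃ t, w = '<' :: 's' :: t) → ¬ p <+: (g ++ w) := by
  intro g w hne hg hw hpre
  have hlen : 2 ≤ p.length := by
    by_contra hl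
    have : (p.take 2).length < 2 := by rw [List.length_take]; omega
    rw [h2] at this; simp at this
  have htake : (g ++ w).take 2 = ['<', 's'] := by
    obtain ⟨r, hr⟩ := hpre
    have h1 := congrArg (List.take 2) hr
    rw [List.take_append_of_le_length hlen, h2] at h1
    exact h1.symm
  obtain _ | ⟨c, g1⟩ := g
  · exact hne rfl
  obtain _ | ⟨d, g'⟩ := g1 <;> rcases hw with rfl | ⟨t, rfl⟩ <;> simp at htake
  · have hlow := hg d (by simp)
    rw [htake.2] at hlow
    exact absurd hlow (by decide)
  · have hlow := hg d (by simp)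
    rw [htake.2] at hlow
    exact absurd hlow (by decide)

theorem pvNot_opn (pc : Bool) (u : List Char) (hu : pvHu u) : ¬ pvOpn pc <+: u := by
  rcases hu with rfl | ⟨g, w, rfl, hne, hg, hw⟩
  · intro h
    rw [List.prefix_nil] at h
    cases pc <;> simp [pvOpn] at h
  · exact pvNot_ls (pvOpn pc) (by cases pc <;> decide) g w hne hg hw

theorem pvAfter_cls (pc : Bool) (u : List Char) (hu : pvHu u) :
    PySem.Chars.replace (pvCls pc ++ u) (pvSeam pc) [] =
      pvCls pc ++ PySem.Chars.replace u (pvSeam pc) [] := by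
  have hnotopn : ¬ pvOpn pc <+: u := pvNot_opn pc u hu
  cases pc
  · -- cls = "</small>"
    have h1 : ¬ pvSeam false <+: (pvCls false ++ u) := by
      rw [show pvSeam false = pvCls false ++ pvOpn false from rfl,
        List.prefix_append_right_inj]
      exact hnotopn
    have hpf : (pvSeam false).isPrefixOf (pvCls false ++ u) = false := by
      rw [← Bool.not_eq_true, List.isPrefixOf_iff_prefix]; exact h1
    rw [show pvCls false ++ u = '<' :: (['/','s','m','a','l','l','>'] ++ u) from rfl]
    rw [pvRepl_skip _ _ (pvSeam_ne false) _ _ (by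
      simpa using (show (pvSeam false).isPrefixOf ('<' :: (['/','s','m','a','l','l','>'] ++ u)) = false from hpf))]
    rw [pvSkip_internal (pvSeam false) [] (pvSeam_ne false) ['/','s','m','a','l','l','>'] u (by decide)]
    rfl
  · -- cls = "</small></small>"
    have h1 : ¬ pvSeam true <+: (pvCls true ++ u) := by
      rw [show pvSeam true = pvCls true ++ pvOpn true from rfl,
        List.prefix_append_right_inj]
      exact hnotopn
    have hpf : (pvSeam true).isPrefixOf (pvCls true ++ u) = false := by
      rw [← Bool.not_eq_true, List.isPrefixOf_iff_prefix]; exact h1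
    -- second '<' position: "</small>" ++ u with the seam's tail refuted by its "</s" head
    have h2 : ¬ pvSeam true <+: (['<','/','s','m','a','l','l','>'] ++ u) := by
      rw [show pvSeam true = ['<','/','s','m','a','l','l','>'] ++ ((pvSeam true).drop 8) from by decide,
        List.prefix_append_right_inj]
      rcases hu with rfl | ⟨g, w, rfl, hne, hg, hw⟩
      · intro h
        rw [List.prefix_nil] at h
        exact absurd h (by decide)
      · exact pvNot_cfs ((pvSeam true).drop 8) (by decide) g w hg hw
    have hpf2 : (pvSeam true).isPrefixOf (['<','/','s','m','a','l','l','>'] ++ u) = false := by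
      rw [← Bool.not_eq_true, List.isPrefixOf_iff_prefix]; exact h2
    rw [show pvCls true ++ u =
        '<' :: (['/','s','m','a','l','l','>'] ++ ('<' :: (['/','s','m','a','l','l','>'] ++ u))) from rfl]
    rw [pvRepl_skip _ _ (pvSeam_ne true) _ _ (by
      simpa using (show (pvSeam true).isPrefixOf (pvCls true ++ u) = false from hpf))]
    rw [pvSkip_internal (pvSeam true) [] (pvSeam_ne true) ['/','s','m','a','l','l','>'] _ (by decide)]
    rw [pvRepl_skip _ _ (pvSeam_ne true) _ _ (by simpa using hpf2)]
    rw [pvSkip_internal (pvSeam true) [] (pvSeam_ne true) ['/','s','m','a','l','l','>'] u (by decide)]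
    rfl

theorem pvSkip_verbatim (pc : Bool) :
    ∀ (g w : List Char), (∀ c ∈ g, pvIsLl c = false) →
      (w = [] ∨ ∃ t, w = '<' :: 's' :: t) →
      PySem.Chars.replace (g ++ w) (pvSeam pc) [] =
        g ++ PySem.Chars.replace w (pvSeam pc) [] := by
  intro g
  induction g with
  | nil => intro w _ _; simp
  | cons c g' ih =>
    intro w hg hw
    have hnp : ¬ pvSeam pc <+: ((c :: g') ++ w) :=
      pvNot_cfs (pvSeam pc) (by cases pc <;> decide) (c :: g') w hg hw
    have hpf : (pvSeam pc).isPrefixOf ((c :: g') ++ w) = false := by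
      rw [← Bool.not_eq_true, List.isPrefixOf_iff_prefix]; exact hnp
    rw [List.cons_append, pvRepl_skip _ _ (pvSeam_ne pc) _ _ (by simpa using hpf)]
    rw [ih w (fun d hd => hg d (by simp [hd])) hw]
    simp

theorem pvUpperChar_ne (c : Char) (h : pvIsLl c = true) : PySem.Chars.upperChar c ≠ '<' := by
  simp only [pvIsLl, Bool.and_eq_true, decide_eq_true_eq] at h
  have h1 : 97 ≤ c.toNat := h.1
  have h2 : c.toNat ≤ 122 := h.2
  have h60 : ('<').toNat = 60 := by decide
  unfold PySem.Chars.upperChar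
  split
  · intro hc
    have := congrArg Char.toNat hc
    rw [Char.toNat_ofNat, if_pos (by constructor; omega), h60] at this
    omega
  · intro hc
    have := congrArg Char.toNat hc
    rw [h60] at this
    omega

theorem pvSkipC (pc : Bool) (c : Char) (h : pvIsLl c = true) (t : List Char) :
    PySem.Chars.replace (PySem.Chars.upperChar c :: t) (pvSeam pc) [] =
      PySem.Chars.upperChar c :: PySem.Chars.replace t (pvSeam pc) [] := by
  apply pvRepl_skip _ _ (pvSeam_ne pc)
  rw [← Bool.not_eq_true, List.isPrefixOf_iff_prefix]
  have := pvNot_pref (pvSeam pc) [PySem.Chars.upperChar c] t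
    (by rw [List.length_singleton]; cases pc <;> decide)
    (by
      have h1 : (pvSeam pc).take 1 = ['<'] := by cases pc <;> decide
      rw [show ([PySem.Chars.upperChar c] : List Char).length = 1 from rfl, h1]
      intro heq
      exact pvUpperChar_ne c h (by simpa using heq.symm))
  simpa using this

theorem pvInner (pc : Bool) :
    ∀ (g : List Char) (c : Char) (u : List Char), pvIsLl c = true →
      (∀ d ∈ g, pvIsLl d = true) → pvHu u →
      PySem.Chars.replace ([PySem.Chars.upperChar c] ++ pvCls pc ++ pvBlocks pc g ++ u) (pvSeam pc) [] =
        [PySem.Chars.upperChar c] ++ PySem.Chars.upper g ++ pvCls pc ++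
          PySem.Chars.replace u (pvSeam pc) [] := by
  intro g
  induction g with
  | nil =>
    intro c u hc _ hu
    rw [show [PySem.Chars.upperChar c] ++ pvCls pc ++ pvBlocks pc [] ++ u =
        PySem.Chars.upperChar c :: (pvCls pc ++ u) from by simp [pvBlocks]]
    rw [pvSkipC pc c hc, pvAfter_cls pc u hu]
    simp [PySem.Chars.upper]
  | cons d g' ih =>
    intro c u hc hk hu
    rw [show [PySem.Chars.upperChar c] ++ pvCls pc ++ pvBlocks pc (d :: g') ++ u =
        PySem.Chars.upperChar c :: (pvSeam pc ++
          ([PySem.Chars.upperChar d] ++ pvCls pc ++ pvBlocks pc g' ++ u)) from by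
      simp [pvBlocks, pvSeam, List.append_assoc]]
    rw [pvSkipC pc c hc, pvRepl_seam _ _ _ (pvSeam_ne pc),
      ih d u (hk d (by simp)) (fun x hx => hk x (by simp [hx])) hu]
    simp [PySem.Chars.upper]

theorem pvWrap_eq (pc : Bool) (g : List Char) :
    pvWrap pc g = pvOpn pc ++ PySem.Chars.upper g ++ pvCls pc := by
  cases pc <;> rfl

theorem pvRun_lower (pc : Bool) (g : List Char) (u : List Char) (hg : g ≠ [])
    (hk : ∀ d ∈ g, pvIsLl d = true) (hu : pvHu u) :
    PySem.Chars.replace (pvBlocks pc g ++ u) (pvSeam pc) [] =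
      pvWrap pc g ++ PySem.Chars.replace u (pvSeam pc) [] := by
  obtain _ | ⟨c, g'⟩ := g
  · exact absurd rfl hg
  rw [show pvBlocks pc (c :: g') ++ u =
      pvOpn pc ++ ([PySem.Chars.upperChar c] ++ pvCls pc ++ pvBlocks pc g' ++ u) from by
    simp [pvBlocks, List.append_assoc]]
  rw [pvSkip_internal (pvSeam pc) [] (pvSeam_ne pc) (pvOpn pc) _ (by cases pc <;> decide)]
  rw [pvInner pc g' c u (hk c (by simp)) (fun x hx => hk x (by simp [hx])) hu]
  rw [pvWrap_eq]
  simp [PySem.Chars.upper]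

theorem pvStream_head (pc : Bool) (rs : List (Bool × List Char))
    (hne : ∀ r ∈ rs, r.2 ≠ []) (hkey : ∀ r ∈ rs, ∀ c ∈ r.2, pvIsLl c = r.1)
    (hhead : ∀ r, rs.head? = some r → r.1 = true) :
    pvStream pc rs = [] ∨ ∃ t, pvStream pc rs = '<' :: 's' :: t := by
  cases rs with
  | nil => left; rfl
  | cons r rs' =>
    right
    obtain ⟨k, g⟩ := r
    have hk : k = true := hhead (k, g) rfl
    obtain _ | ⟨c, g'⟩ := g
    · exact absurd rfl (hne (k, []) (by simp))
    have hc : pvIsLl c = true := by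
      have := hkey (k, c :: g') (by simp) c (by simp)
      rw [this, hk]
    have hblock : pvBlock pc c = pvOpn pc ++ [PySem.Chars.upperChar c] ++ pvCls pc := by
      simp [pvBlock, hc]
    have hopn : ∃ t0, pvOpn pc = '<' :: 's' :: t0 := by
      cases pc
      · exact ⟨['m','a','l','l','>'], rfl⟩
      · exact ⟨"mall><small>".toList, rfl⟩
    obtain ⟨t0, ht0⟩ := hopn
    refine ⟨t0 ++ [PySem.Chars.upperChar c] ++ pvCls pc ++ (g'.map (pvBlock pc)).flatten ++
      pvStream pc rs', ?_⟩
    simp [pvStream, hblock, ht0, List.append_assoc]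

theorem pvAlt_tail (a : Bool × List Char) (rs : List (Bool × List Char))
    (h : pvAlt (a :: rs)) : pvAlt rs := by
  cases rs with
  | nil => trivial
  | cons b rs' => exact h.2

theorem pvBlocks_id (pc : Bool) : ∀ (g : List Char), (∀ c ∈ g, pvIsLl c = false) →
    (g.map (pvBlock pc)).flatten = g := by
  intro g
  induction g with
  | nil => intro _; rfl
  | cons c cs ihg =>
    intro h
    have hc : pvIsLl c = false := h c (by simp)
    simp only [List.map_cons, List.flatten_cons, pvBlock, hc]
    rw [ihg (fun x hx => h x (by simp [hx]))]
    simp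

theorem pvBlocks_low (pc : Bool) (g : List Char) (h : ∀ c ∈ g, pvIsLl c = true) :
    (g.map (pvBlock pc)).flatten = pvBlocks pc g := by
  unfold pvBlocks
  congr 1
  apply List.map_congr_left
  intro c hc
  simp [pvBlock, h c hc]

theorem pvMain (pc : Bool) :
    ∀ (rs : List (Bool × List Char)), (∀ r ∈ rs, r.2 ≠ []) →
      (∀ r ∈ rs, ∀ c ∈ r.2, pvIsLl c = r.1) → pvAlt rs →
      PySem.Chars.replace (pvStream pc rs) (pvSeam pc) [] =
        (rs.map (pvRenderB pc)).flatten := by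
  intro rs
  induction rs with
  | nil => intro _ _ _; simpa [pvStream] using pvRepl_nil (pvSeam pc) [] (pvSeam_ne pc)
  | cons r rs' ih =>
    intro hne hkey halt
    obtain ⟨k, g⟩ := r
    have hgne : g ≠ [] := hne (k, g) (by simp)
    have hstream : pvStream pc ((k, g) :: rs') =
        (g.map (pvBlock pc)).flatten ++ pvStream pc rs' := by
      simp [pvStream]
    have hne' : ∀ r ∈ rs', r.2 ≠ [] := fun x hx => hne x (by simp [hx])
    have hkey' : ∀ r ∈ rs', ∀ c ∈ r.2, pvIsLl c = r.1 := fun x hx => hkey x (by simp [hx])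
    have halt' : pvAlt rs' := pvAlt_tail _ _ halt
    cases k with
    | false =>
      have hglow : ∀ c ∈ g, pvIsLl c = false := fun c hc => hkey (false, g) (by simp) c hc
      have hshape : pvStream pc rs' = [] ∨ ∃ t, pvStream pc rs' = '<' :: 's' :: t := by
        apply pvStream_head pc rs' hne' hkey'
        intro r2 hr2
        cases rs' with
        | nil => simp at hr2
        | cons q qs =>
          have hq : r2 = q := by simpa using hr2.symm
          subst hq
          have := (halt.1 : (false, g).1 ≠ r2.1)
          simp only at this
          cases h2 : r2.1
          · exact absurd h2.symm this
          · rfl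
      rw [hstream, pvBlocks_id pc g hglow,
        pvSkip_verbatim pc g (pvStream pc rs') hglow hshape,
        ih hne' hkey' halt']
      simp [pvRenderB]
    | true =>
      have hglow : ∀ c ∈ g, pvIsLl c = true := fun c hc => hkey (true, g) (by simp) c hc
      have hu : pvHu (pvStream pc rs') := by
        cases rs' with
        | nil => left; rfl
        | cons r2 rs'' =>
          right
          obtain ⟨k2, g2⟩ := r2
          have hk2 : k2 = false := by
            have := (halt.1 : (true, g).1 ≠ (k2, g2).1)
            simp only at this
            cases h2 : k2
            · rfl
            · exact absurd h2.symm this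
          subst hk2
          have hg2low : ∀ c ∈ g2, pvIsLl c = false :=
            fun c hc => hkey' (false, g2) (by simp) c hc
          have hg2ne : g2 ≠ [] := hne' (false, g2) (by simp)
          refine ⟨g2, pvStream pc rs'', ?_, hg2ne, hg2low, ?_⟩
          · rw [show pvStream pc ((false, g2) :: rs'') =
              (g2.map (pvBlock pc)).flatten ++ pvStream pc rs'' from by simp [pvStream]]
            rw [pvBlocks_id pc g2 hg2low]
          · apply pvStream_head pc rs'' (fun x hx => hne' x (by simp [hx]))
              (fun x hx => hkey' x (by simp [hx]))
            intro r3 hr3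
            cases rs'' with
            | nil => simp at hr3
            | cons q qs =>
              have hq : r3 = q := by simpa using hr3.symm
              subst hq
              have := ((pvAlt_tail _ _ halt).1 : (false, g2).1 ≠ r3.1)
              simp only at this
              cases h3 : r3.1
              · exact absurd h3.symm this
              · rfl
      rw [hstream, pvBlocks_low pc g hglow,
        pvRun_lower pc g (pvStream pc rs') hgne hglow hu,
        ih hne' hkey' halt']
      simp [pvRenderB]

theorem pvFlattenMap (f : Char → List Char) :
    ∀ (L : List (List Char)), (L.flatten.map f).flatten =
      (L.map (fun g => (g.map f).flatten)).flatten := by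
  intro L
  induction L with
  | nil => rfl
  | cons g L' ihl =>
    simp only [List.flatten_cons, List.map_append, List.flatten_append, ihl,
      List.map_cons]

theorem pvNameB_eq (pc : Bool) (cs : List Char) :
    PySem.Chars.replace ((cs.map (pvBlock pc)).flatten) (pvCls pc ++ pvOpn pc) [] =
      ((pvRuns cs).map (pvRenderB pc)).flatten := by
  have hcs : (cs.map (pvBlock pc)).flatten = pvStream pc (pvRuns cs) := by
    conv_lhs => rw [← pvRuns_flatten cs]
    rw [pvFlattenMap (pvBlock pc) ((pvRuns cs).map Prod.snd)]
    simp only [pvStream, List.map_map]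
    rfl
  rw [show pvCls pc ++ pvOpn pc = pvSeam pc from rfl, hcs]
  exact pvMain pc (pvRuns cs) (pvRuns_nonempty cs) (pvRuns_keys cs) (pvRuns_alt cs)

-- ===== VERDICT (by name: the statement is the Claim_ definition above) =====
theorem fake_small_caps_py_spec : Claim_equal_fake_small_caps_py := by
  intro names pc _
  show fake_small_caps_py names pc = fake_small_caps_py_alt names pc
  unfold fake_small_caps_py fake_small_caps_py_alt
  rw [pvFold_names]
  simp only [List.nil_append]
  apply List.map_congr_left
  intro name _
  rw [pvNameB_eq]
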